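-- pv_equiv track=rewrite | github.com/nicolasbrailo/SpotiWeb | sp.py | _index_artists_by_genre
-- ===== SOURCE A (Python) =====
-- def _index_artists_by_genre(lst):
--     arts_by_genre = {}
--     for art in lst:
--         for gen in art["genres"]:
--             try:
--                 arts_by_genre[gen].append(art["name"])
--             except KeyError:
--                 arts_by_genre[gen] = [art["name"]]
--     return arts_by_genre
-- ===== SOURCE B (Python) =====
-- def _index_artists_by_genre(lst):
--     # Flatten to (genre, name) pairs, dedupe genres in first-appearance order,
--     # then build each genre's name list with one filtering pass over the flat list.
--     pairs = [(gen, art["name"]) for art in lst for gen in art["genres"]]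
--     genres = list(dict.fromkeys(gen for gen, _ in pairs))
--     return {gen: [name for g, name in pairs if g == gen] for gen in genres}
-- ===== Notes on version B (the rewrite author's own statement) =====
-- stated objective: alternative
-- what changed: Replaces incremental dict growth with try/except per pair by a flatten-to-(genre,name)-pairs pass, an ordered dedup of the genre keys, and a per-genre filtering pass over the flat pair list.
import Mathlib
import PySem

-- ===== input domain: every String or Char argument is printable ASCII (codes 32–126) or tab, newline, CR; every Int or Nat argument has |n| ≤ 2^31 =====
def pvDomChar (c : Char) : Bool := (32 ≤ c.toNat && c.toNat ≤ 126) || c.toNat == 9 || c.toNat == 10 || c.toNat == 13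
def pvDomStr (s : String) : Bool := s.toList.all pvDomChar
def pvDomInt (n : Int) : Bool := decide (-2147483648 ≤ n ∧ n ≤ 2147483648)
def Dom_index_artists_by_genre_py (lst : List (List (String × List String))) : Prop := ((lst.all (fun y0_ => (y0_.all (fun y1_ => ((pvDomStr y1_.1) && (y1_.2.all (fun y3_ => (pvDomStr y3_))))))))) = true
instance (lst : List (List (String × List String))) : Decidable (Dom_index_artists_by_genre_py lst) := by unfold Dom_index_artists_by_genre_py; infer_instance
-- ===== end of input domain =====

-- B replaces A's incremental dict-growth (try/except per (genre,name) pair) by a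
-- flatten-pairs / ordered-dedup-keys / per-genre-filter decomposition; alternative, not faster.


-- ===== PORT A =====
-- for art in lst: for gen in art["genres"]: try append / except insert singleton
def index_artists_by_genre_py (lst : List (List (String × List String))) : List (String × List (List String)) :=
  (lst.foldl (fun d art =>
      ((PySem.Dict.mk art).getD "genres" []).foldl (fun d gen =>
          match d.get? gen with
          | some names => d.insert gen (names ++ [(PySem.Dict.mk art).getD "name" []])
          | none       => d.insert gen [(PySem.Dict.mk art).getD "name" []]) d)
    PySem.Dict.empty).items

-- ===== PORT B =====
-- pairs = [(gen, art["name"]) ...]; genres = list(dict.fromkeys(...)); dict comprehension with a filter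
def index_artists_by_genre_py_alt (lst : List (List (String × List String))) : List (String × List (List String)) :=
  let pairs := lst.flatMap (fun art =>
      ((PySem.Dict.mk art).getD "genres" []).map (fun gen => (gen, (PySem.Dict.mk art).getD "name" [])))
  let genres := PySem.List.dedup (pairs.map (·.1))
  genres.map (fun gen => (gen, (pairs.filter (fun p => p.1 == gen)).map (·.2)))

-- ===== PRECONDITION & SPEC =====
-- Pre_ excludes exactly the inputs where Python A raises KeyError: an artist dict
-- missing the "genres" key, or (when its genre list is nonempty) missing "name".
def Pre_index_artists_by_genre_py (lst : List (List (String × List String))) : Prop :=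
  (lst.all (fun art => (PySem.Dict.mk art).contains "genres" &&
      (((PySem.Dict.mk art).getD "genres" []).isEmpty || (PySem.Dict.mk art).contains "name"))) = true
instance (lst : List (List (String × List String))) : Decidable (Pre_index_artists_by_genre_py lst) := by unfold Pre_index_artists_by_genre_py; infer_instance
def pvWitness_index_artists_by_genre_py : (List (List (String × List String))) :=
  [[("genres", ["rock", "pop"]), ("name", ["Ana"])], [("genres", ["pop"]), ("name", ["Bo"])]]

def Spec_index_artists_by_genre_py (lst : List (List (String × List String))) (out : List (String × List (List String))) : Prop := out = index_artists_by_genre_py_alt lst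
instance (lst : List (List (String × List String))) (out : List (String × List (List String))) : Decidable (Spec_index_artists_by_genre_py lst out) := by unfold Spec_index_artists_by_genre_py; infer_instance

-- ===== CLAIM (what is proved, stated in full; the proofs are below) =====
def Claim_equal_index_artists_by_genre_py : Prop := ∀ (lst : List (List (String × List String))), Dom_index_artists_by_genre_py lst → Pre_index_artists_by_genre_py lst → Spec_index_artists_by_genre_py lst (index_artists_by_genre_py lst)

-- ===== LEMMAS AND PROOFS =====

-- A's try/except step is exactly d[gen] = d.get(gen, []) + [name].
theorem aStep_eq_modify (d : PySem.Dict String (List (List String))) (gen : String) (nm : List String) :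
    (match d.get? gen with
     | some names => d.insert gen (names ++ [nm])
     | none       => d.insert gen [nm]) = d.modify gen [] (· ++ [nm]) := by
  cases h : d.get? gen with
  | some names =>
      simp [PySem.Dict.modify, PySem.Dict.getD_eq_get?_getD, h]
  | none =>
      simp [PySem.Dict.modify, PySem.Dict.getD_eq_get?_getD, h]

-- folding a pair-wise op over a flatMap = nested folds
theorem foldl_flatMap' {α β γ : Type} (l : List α) (f : α → List β) (g : γ → β → γ) (init : γ) :
    (l.flatMap f).foldl g init = l.foldl (fun c a => (f a).foldl g c) init := by
  induction l generalizing init with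
  | nil => rfl
  | cons a t ih => simp [List.flatMap_cons, List.foldl_append, ih]

-- A's nested loops, rewritten as one fold of modify over the flattened pair list
theorem portA_as_pair_fold (lst : List (List (String × List String))) :
    index_artists_by_genre_py lst =
      (List.foldl (fun d p => d.modify p.1 [] (· ++ [p.2])) PySem.Dict.empty
        (lst.flatMap (fun art =>
          ((PySem.Dict.mk art).getD "genres" []).map (fun gen => (gen, (PySem.Dict.mk art).getD "name" []))))).items := by
  unfold index_artists_by_genre_py
  rw [foldl_flatMap']
  congr 1
  apply PySem.List.foldl_congr_mem
  intro d art _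
  rw [List.foldl_map]
  apply PySem.List.foldl_congr_mem
  intro d' gen _
  exact aStep_eq_modify d' gen _

-- ===== VERDICT (by name: the statement is the Claim_ definition above) =====
theorem index_artists_by_genre_py_spec : Claim_equal_index_artists_by_genre_py := by
  intro lst _ _
  unfold Spec_index_artists_by_genre_py index_artists_by_genre_py_alt
  rw [portA_as_pair_fold]
  set pairs := lst.flatMap (fun art =>
      ((PySem.Dict.mk art).getD "genres" []).map (fun gen => (gen, (PySem.Dict.mk art).getD "name" []))) with hpairs
  have hkeys : ((pairs.foldl (fun d p => d.modify p.1 [] (· ++ [p.2])) PySem.Dict.empty).keys)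
      = PySem.List.dedup (pairs.map (·.1)) := by
    rw [PySem.Dict.keys_foldl_modify_key]
    simp [PySem.Dict.keys_empty, PySem.Set.update, PySem.Set.ofList_eq_foldl, PySem.List.dedup_eq_ofList]
  have hnd : ((pairs.foldl (fun d p => d.modify p.1 [] (· ++ [p.2])) PySem.Dict.empty).keys).Nodup := by
    apply PySem.Dict.nodup_keys_foldl_modify_key
    simp [PySem.Dict.keys_empty]
  rw [PySem.Dict.items_eq_map_keys _ hnd ([] : List (List String)), hkeys]
  apply List.map_congr_left
  intro gen _
  simp [PySem.Dict.getD_foldl_modify_append, PySem.Dict.getD_empty]
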